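-- pv_equiv track=rewrite | github.com/jnatalini/projects | budget_app/budget_tool.py | normalize_csv_values
-- ===== SOURCE A (Python) =====
-- from typing import Dict, Iterable, List, Optional, Tuple
--
-- def normalize_csv_values(values: Optional[List[str]]) -> List[str]:
--     if not values:
--         return []
--     results: List[str] = []
--     for value in values:
--         parts = [item.strip() for item in value.split(",")]
--         results.extend([item for item in parts if item])
--     return results
-- ===== SOURCE B (Python) =====
-- def normalize_csv_values(values):
--     if not values:
--         return []
--     out = []
--     for value in values:
--         cur = []
--         for ch in value:
--             if ch == ',':
--                 tok = ''.join(cur).strip()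
--                 if tok:
--                     out.append(tok)
--                 cur = []
--             else:
--                 cur.append(ch)
--         tok = ''.join(cur).strip()
--         if tok:
--             out.append(tok)
--     return out
-- ===== Notes on version B (the rewrite author's own statement) =====
-- stated objective: alternative
-- what changed: Replaces str.split plus a per-value list comprehension/extend with a hand-written character-level tokenizer: a single state machine scans each string's characters, accumulates the current token, and flushes (strip, drop-if-empty, append) at each comma and at end of string.
import Mathlib
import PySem

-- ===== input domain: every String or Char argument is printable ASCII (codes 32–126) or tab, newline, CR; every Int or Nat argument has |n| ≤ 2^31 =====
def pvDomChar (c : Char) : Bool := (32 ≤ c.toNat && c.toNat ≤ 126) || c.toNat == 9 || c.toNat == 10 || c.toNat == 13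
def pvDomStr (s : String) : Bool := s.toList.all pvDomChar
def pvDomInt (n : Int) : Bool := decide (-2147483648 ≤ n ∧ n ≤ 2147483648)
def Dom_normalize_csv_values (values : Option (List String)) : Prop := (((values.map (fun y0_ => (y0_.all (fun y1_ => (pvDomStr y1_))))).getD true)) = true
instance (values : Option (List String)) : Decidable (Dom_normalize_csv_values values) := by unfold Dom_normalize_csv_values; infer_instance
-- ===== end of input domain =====

-- B replaces A's per-value str.split/strip/extend pipeline with a hand-written
-- character-level tokenizer (state machine); objective: alternative (same return value).

-- ===== PORT A =====
-- literal port of A: loop over values, split each on ",", strip, keep non-empty, extend accumulator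
def normalize_csv_values (values : Option (List String)) : List String :=
  match values with
  | none => []
  | some vs =>
    if vs = [] then []
    else
      vs.foldl (fun results value =>
        let parts : List String :=
          (PySem.Chars.splitOn value.toList ",".toList).map
            (fun item => String.ofList (PySem.Chars.strip item))
        results ++ parts.filter (fun item => item ≠ "")) []

-- ===== PORT B =====
-- literal port of B's tokenizer: flush the current token (strip; append if non-empty)
def emitTok (out : List String) (cur : List Char) : List String :=
  let tok := String.ofList (PySem.Chars.strip cur)
  if tok ≠ "" then out ++ [tok] else out

-- the inner character loop of B (cur.append(ch) / flush at ',')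
def scanValue (out : List String) (l : List Char) (cur : List Char) : List String :=
  match l with
  | [] => emitTok out cur
  | c :: rest => if c = ',' then scanValue (emitTok out cur) rest [] else scanValue out rest (cur ++ [c])

def normalize_csv_values_alt (values : Option (List String)) : List String :=
  match values with
  | none => []
  | some vs =>
    if vs = [] then []
    else
      vs.foldl (fun out value => scanValue out value.toList []) []

-- ===== PRECONDITION & SPEC =====
def Spec_normalize_csv_values (values : Option (List String)) (out : List String) : Prop := out = normalize_csv_values_alt values
instance (values : Option (List String)) (out : List String) : Decidable (Spec_normalize_csv_values values out) := by unfold Spec_normalize_csv_values; infer_instance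

-- ===== CLAIM (what is proved, stated in full; the proofs are below) =====
def Claim_equal_normalize_csv_values : Prop := ∀ (values : Option (List String)), Dom_normalize_csv_values values → Spec_normalize_csv_values values (normalize_csv_values values)

-- ===== LEMMAS AND PROOFS =====

-- simple structural recursion equal to Python's split on ","
def spC : List Char → List (List Char)
  | [] => [[]]
  | c :: rest => if c = ',' then [] :: spC rest else (spC rest).modifyHead (c :: ·)

theorem spC_ne_nil (l : List Char) : spC l ≠ [] := by
  cases l with
  | nil => simp [spC]
  | cons c rest =>
    simp only [spC]
    split
    · simp
    · cases h : spC rest with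
      | nil => exact absurd h (spC_ne_nil rest)
      | cons a t => simp

theorem splitOn_go_eq (fuel : Nat) :
    ∀ (l cur : List Char) (acc : List (List Char)), l.length < fuel →
      PySem.Chars.splitOn.go [','] fuel l cur acc
        = acc.reverse ++ (spC l).modifyHead (cur.reverse ++ ·) := by
  induction fuel with
  | zero => intro l cur acc h; omega
  | succ fuel ih =>
    intro l cur acc h
    cases l with
    | nil =>
      simp [PySem.Chars.splitOn.go, spC]
    | cons c rest =>
      rw [PySem.Chars.splitOn.go]
      by_cases hc : c = ','
      · subst hc
        have hpre : List.isPrefixOf [','] (',' :: rest) = true := by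
          simp [List.isPrefixOf]
        rw [if_pos hpre]
        have := ih rest [] (List.reverse cur :: acc) (by simpa using Nat.lt_of_succ_lt_succ h)
        simp only [List.length_cons, List.length_nil, List.drop_succ_cons, List.drop_zero] at this ⊢
        rw [this]
        simp [spC]
        cases spC rest <;> simp
      · have hpre : List.isPrefixOf [','] (c :: rest) = false := by
          simp [List.isPrefixOf, BEq.beq]
          intro hcc; exact absurd hcc.symm hc
        rw [if_neg (by simp [hpre])]
        have := ih rest (c :: cur) acc (by simpa using Nat.lt_of_succ_lt_succ h)
        rw [this]
        obtain ⟨a, t, hat⟩ : ∃ a t, spC rest = a :: t := by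
          cases hsp : spC rest with
          | nil => exact absurd hsp (spC_ne_nil rest)
          | cons a t => exact ⟨a, t, rfl⟩
        simp [spC, hc, hat]

theorem splitOn_eq_spC (s : List Char) :
    PySem.Chars.splitOn s [','] = spC s := by
  unfold PySem.Chars.splitOn
  rw [splitOn_go_eq (s.length + 1) s [] [] (Nat.lt_succ_self _)]
  obtain ⟨a, t, hat⟩ : ∃ a t, spC s = a :: t := by
    cases hsp : spC s with
    | nil => exact absurd hsp (spC_ne_nil s)
    | cons a t => exact ⟨a, t, rfl⟩
  simp [hat]

-- per-value result of A's pipeline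
def pieceF (l : List Char) : List String :=
  ((spC l).map (fun item => String.ofList (PySem.Chars.strip item))).filter (fun s => s ≠ "")

-- B's character scan computes A's split-strip-filter pipeline, token by token
theorem scanValue_eq_pieceF (l : List Char) : ∀ (out : List String) (cur : List Char),
    scanValue out l cur
      = out ++ (((spC l).modifyHead (cur ++ ·)).map
          (fun item => String.ofList (PySem.Chars.strip item))).filter (fun s => s ≠ "") := by
  induction l with
  | nil =>
    intro out cur
    simp [scanValue, spC, emitTok]
    split <;> simp_all
  | cons c rest ih =>
    intro out cur
    by_cases hc : c = ','
    · subst hc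
      simp only [scanValue, reduceIte]
      rw [ih (emitTok out cur) []]
      obtain ⟨a, t, hat⟩ : ∃ a t, spC rest = a :: t := by
        cases hsp : spC rest with
        | nil => exact absurd hsp (spC_ne_nil rest)
        | cons a t => exact ⟨a, t, rfl⟩
      simp only [spC, hat, List.modifyHead, List.nil_append, List.map_cons,
        List.filter_cons, emitTok]
      by_cases h : String.ofList (PySem.Chars.strip cur) = "" <;>
        by_cases h2 : String.ofList (PySem.Chars.strip a) = "" <;>
          simp [h, h2, List.filter_cons, List.append_assoc]
    · simp only [scanValue, if_neg hc]
      rw [ih out (cur ++ [c])]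
      obtain ⟨a, t, hat⟩ : ∃ a t, spC rest = a :: t := by
        cases hsp : spC rest with
        | nil => exact absurd hsp (spC_ne_nil rest)
        | cons a t => exact ⟨a, t, rfl⟩
      simp [spC, hc, hat]

theorem foldl_scan (vs : List String) : ∀ (out : List String),
    vs.foldl (fun out value => scanValue out value.toList []) out
      = out ++ vs.flatMap (fun value => pieceF value.toList) := by
  induction vs with
  | nil => intro out; simp
  | cons v rest ih =>
    intro out
    simp only [List.foldl_cons, List.flatMap_cons]
    rw [ih, scanValue_eq_pieceF]
    obtain ⟨a, t, hat⟩ : ∃ a t, spC v.toList = a :: t := by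
      cases hsp : spC v.toList with
      | nil => exact absurd hsp (spC_ne_nil _)
      | cons a t => exact ⟨a, t, rfl⟩
    simp [pieceF, hat, List.append_assoc]

-- ===== VERDICT (by name: the statement is the Claim_ definition above) =====
theorem normalize_csv_values_spec : Claim_equal_normalize_csv_values := by
  intro values _
  unfold Spec_normalize_csv_values normalize_csv_values normalize_csv_values_alt
  cases values with
  | none => rfl
  | some vs =>
    by_cases hvs : vs = []
    · simp [hvs]
    · simp only [if_neg hvs]
      have hfold :
          vs.foldl (fun results value =>
            results ++ ((PySem.Chars.splitOn value.toList ",".toList).map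
              (fun item => String.ofList (PySem.Chars.strip item))).filter
                (fun item => item ≠ "")) []
          = vs.flatMap (fun value => pieceF value.toList) := by
        rw [PySem.List.foldl_append_eq_flatMap]
        simp only [List.nil_append]
        exact List.flatMap_congr (fun v _ => by
          rw [show (",".toList : List Char) = [','] from rfl, splitOn_eq_spC]; rfl)
      rw [hfold, foldl_scan]
      simp
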